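-- pv_equiv track=rewrite | github.com/jin-jae/Coding-Test-Study | eunjee-choi/week01_hash/PGM_best_album.py | solution
-- ===== SOURCE A (Python) =====
-- def solution(genres, plays):
--     genre_play_count = {}
--     song_list_by_genre = {}
--
--     for i, (genre, play) in enumerate(zip(genres, plays)):
--         if genre not in genre_play_count:
--             genre_play_count[genre] = 0
--             song_list_by_genre[genre] = []
--         genre_play_count[genre] += play
--         song_list_by_genre[genre].append((play, i))
--
--     sorted_genres = sorted(genre_play_count, key=genre_play_count.get, reverse=True)
--
--     answer = []
--     for genre in sorted_genres:
--         sorted_songs = sorted(song_list_by_genre[genre], key=lambda x: (-x[0], x[1]))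
--         answer.extend(idx for _, idx in sorted_songs[:2])
--     return answer
-- ===== SOURCE B (Python) =====
-- def solution(genres, plays):
--     n = min(len(genres), len(plays))
--
--     total = {}
--     for g, p in zip(genres, plays):
--         total[g] = total.get(g, 0) + p
--
--     # genre rank: 0 for the genre with the largest total (ties by first appearance), etc.
--     rank = {g: r for r, g in enumerate(sorted(total, key=total.get, reverse=True))}
--
--     # one composite ordering of all songs via two stable sorts:
--     # final order is (genre rank asc, play desc, index asc)
--     order = sorted(range(n), key=lambda i: -plays[i])
--     order.sort(key=lambda i: rank[genres[i]])
--
--     answer = []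
--     taken = {}
--     for i in order:
--         g = genres[i]
--         c = taken.get(g, 0)
--         if c < 2:
--             answer.append(i)
--             taken[g] = c + 1
--     return answer
-- ===== Notes on version B (the rewrite author's own statement) =====
-- stated objective: alternative
-- what changed: Instead of sorting each genre's song list separately and extending the answer per genre, B builds one composite ordering of all songs (a stable sort by -plays followed by a stable sort by genre rank) and emits the answer in a single counting pass that keeps at most two songs per genre.
import Mathlib
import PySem

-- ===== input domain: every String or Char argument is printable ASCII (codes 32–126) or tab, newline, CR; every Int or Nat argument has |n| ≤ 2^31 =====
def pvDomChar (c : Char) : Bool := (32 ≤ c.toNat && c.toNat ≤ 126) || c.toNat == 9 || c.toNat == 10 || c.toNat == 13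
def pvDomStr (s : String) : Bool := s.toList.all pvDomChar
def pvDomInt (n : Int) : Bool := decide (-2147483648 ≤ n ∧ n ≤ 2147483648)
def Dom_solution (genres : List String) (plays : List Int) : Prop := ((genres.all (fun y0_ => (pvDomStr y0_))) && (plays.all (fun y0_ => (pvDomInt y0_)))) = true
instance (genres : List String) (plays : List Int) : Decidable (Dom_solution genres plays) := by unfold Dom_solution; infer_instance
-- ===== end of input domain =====

-- B replaces A's per-genre sorts with one composite ordering of all songs (two stable sorts) plus a
-- single counting pass; an alternative decomposition proved to return exactly A's list.

-- ===== PORT A =====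
-- literal transliteration of A: one pass builds the per-genre total dict and song-list dict,
-- genres are sorted by total (reverse=True), then each genre's songs are sorted and the top 2 appended.
-- `.get` as sort key and `+=`/`.append` lookups are exact as getD/modify since the key is always present.
def solution (genres : List String) (plays : List Int) : List Int :=
  let st :=
    (PySem.List.enumerate (genres.zip plays)).foldl
      (fun st e =>
        -- if genre not in genre_play_count: initialise both dicts
        let st1 := if st.1.contains e.2.1 then st else (st.1.insert e.2.1 0, st.2.insert e.2.1 [])
        -- genre_play_count[genre] += play ; song_list_by_genre[genre].append((play, i))
        (st1.1.insert e.2.1 (st1.1.getD e.2.1 0 + e.2.2),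
         st1.2.modify e.2.1 [] (fun l => l ++ [(e.2.2, e.1)])))
      (PySem.Dict.empty, PySem.Dict.empty)
  (PySem.List.sorted st.1.keys (fun g => st.1.getD g 0) true).foldl
    (fun answer g =>
      answer ++
        (PySem.List.slice
          (PySem.List.sorted2 (st.2.getD g []) (fun x => -x.1) (fun x => x.2))
          none (some 2)).map (fun x => x.2))
    []

-- ===== PORT B =====
-- literal transliteration of B (Source B): totals in one pass, a rank dict over the genre order,
-- two stable sorts of range(n), then one counting pass keeping at most 2 songs per genre.
-- genres[i]/plays[i] are ported with pyGetD: i is always in range (0 ≤ i < n), and rank[genres[i]]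
-- with getD: the key is always present.
def solution_alt (genres : List String) (plays : List Int) : List Int :=
  let n : Int := min (genres.length : Int) (plays.length : Int)
  let total := (genres.zip plays).foldl
      (fun d gp => d.insert gp.1 (d.getD gp.1 0 + gp.2)) PySem.Dict.empty
  -- rank = {g: r for r, g in enumerate(sorted(total, key=total.get, reverse=True))}
  let rank := (PySem.List.enumerate
      (PySem.List.sorted total.keys (fun g => total.getD g 0) true)).foldl
      (fun d rg => d.insert rg.2 rg.1) PySem.Dict.empty
  let order := PySem.List.sorted (PySem.List.pyRange 0 n)
      (fun i => -(PySem.List.pyGetD plays i 0)) false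
  let order2 := PySem.List.sorted order
      (fun i => rank.getD (PySem.List.pyGetD genres i "") 0) false
  (order2.foldl
      (fun (st : List Int × PySem.Dict String Int) i =>
        let g := PySem.List.pyGetD genres i ""
        let c := st.2.getD g 0
        if c < 2 then (st.1 ++ [i], st.2.insert g (c + 1)) else st)
      ([], PySem.Dict.empty)).1

-- ===== PRECONDITION & SPEC =====
def Spec_solution (genres : List String) (plays : List Int) (out : List Int) : Prop := out = solution_alt genres plays
instance (genres : List String) (plays : List Int) (out : List Int) : Decidable (Spec_solution genres plays out) := by unfold Spec_solution; infer_instance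

-- ===== CLAIM (what is proved, stated in full; the proofs are below) =====
def Claim_equal_solution : Prop := ∀ (genres : List String) (plays : List Int), Dom_solution genres plays → Spec_solution genres plays (solution genres plays)

-- ===== LEMMAS AND PROOFS =====

-- strict "sort by key, ties by Q" order
def pvLexOn {α : Type} (k : α → Int) (Q : α → α → Prop) (a b : α) : Prop :=
  k a < k b ∨ (k a = k b ∧ Q a b)

theorem pvLexOn_trans {α : Type} (k : α → Int) (Q : α → α → Prop)
    (hQt : ∀ a b c, Q a b → Q b c → Q a c) :
    ∀ a b c, pvLexOn k Q a b → pvLexOn k Q b c → pvLexOn k Q a c := by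
  intro a b c hab hbc
  rcases hab with h | ⟨he, hq⟩ <;> rcases hbc with h' | ⟨he', hq'⟩
  · exact Or.inl (by omega)
  · exact Or.inl (by omega)
  · exact Or.inl (by omega)
  · exact Or.inr ⟨by omega, hQt _ _ _ hq hq'⟩

theorem pvLexOn_asymm {α : Type} (k : α → Int) (Q : α → α → Prop)
    (hQa : ∀ a b, Q a b → Q b a → False) :
    ∀ a b, pvLexOn k Q a b → pvLexOn k Q b a → False := by
  intro a b hab hba
  rcases hab with h | ⟨he, hq⟩ <;> rcases hba with h' | ⟨he', hq'⟩
  · omega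
  · omega
  · omega
  · exact hQa _ _ hq hq'

-- two permutations of each other, both Pairwise w.r.t. an asymmetric relation, are equal
theorem pv_pairwise_perm_eq {α : Type} {R : α → α → Prop}
    (hasym : ∀ a b, R a b → R b a → False) :
    ∀ (l1 l2 : List α), l1.Perm l2 → l1.Pairwise R → l2.Pairwise R → l1 = l2 := by
  intro l1
  induction l1 with
  | nil => intro l2 hp _ _; exact hp.nil_eq
  | cons a t1 ih =>
    intro l2 hp h1 h2
    cases l2 with
    | nil => exact absurd hp.symm (by simp)
    | cons b t2 =>
      by_cases hab : a = b
      · subst hab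
        exact congrArg (a :: ·) (ih t2 hp.cons_inv h1.tail h2.tail)
      · exfalso
        have ha2 : a ∈ b :: t2 := hp.mem_iff.mp (List.mem_cons_self ..)
        have ha2' : a ∈ t2 := by
          rcases ha2 with _ | h
          · exact absurd rfl hab
          · assumption
        have hb1 : b ∈ a :: t1 := hp.mem_iff.mpr (List.mem_cons_self ..)
        have hb1' : b ∈ t1 := by
          rcases hb1 with _ | h
          · exact absurd rfl (Ne.symm hab)
          · assumption
        exact hasym a b ((List.pairwise_cons.mp h1).1 b hb1')
          ((List.pairwise_cons.mp h2).1 a ha2')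

theorem pv_insertBy_perm {α : Type} (before : α → α → Bool) (x : α) :
    ∀ (l : List α), (PySem.List.insertBy before x l).Perm (x :: l) := by
  intro l
  induction l with
  | nil => simp [PySem.List.insertBy]
  | cons y ys ih =>
    simp only [PySem.List.insertBy]
    split
    · exact List.Perm.refl _
    · exact (ih.cons y).trans (List.Perm.swap x y ys)

theorem pv_insertBy_pairwise {α : Type} (before : α → α → Bool) (R Q : α → α → Prop)
    (hA1 : ∀ a b, before a b = true → R a b)
    (hA3 : ∀ a b, before b a = false → Q a b → R a b)
    (htrans : ∀ a b c, R a b → R b c → R a c) (x : α) :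
    ∀ (l : List α), l.Pairwise R → (∀ y ∈ l, Q y x) →
      (PySem.List.insertBy before x l).Pairwise R := by
  intro l
  induction l with
  | nil => intro _ _; simp [PySem.List.insertBy]
  | cons y ys ih =>
    intro hl hq
    simp only [PySem.List.insertBy]
    split
    · rename_i hb
      refine List.pairwise_cons.mpr ⟨?_, hl⟩
      intro z hz
      rcases List.mem_cons.mp hz with rfl | hz
      · exact hA1 _ _ hb
      · exact htrans _ _ _ (hA1 _ _ hb) ((List.pairwise_cons.mp hl).1 z hz)
    · rename_i hb
      refine List.pairwise_cons.mpr ⟨?_, ?_⟩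
      · intro z hz
        rcases (PySem.List.mem_insertBy before x z ys).mp hz with hz | hz
        · subst hz
          exact hA3 y z (by simpa using hb) (hq y (List.mem_cons_self ..))
        · exact (List.pairwise_cons.mp hl).1 z hz
      · exact ih hl.tail (fun z hz => hq z (List.mem_cons_of_mem _ hz))

theorem pv_sortedBy_aux {α : Type} (before : α → α → Bool) (R Q : α → α → Prop)
    (hA1 : ∀ a b, before a b = true → R a b)
    (hA3 : ∀ a b, before b a = false → Q a b → R a b)
    (htrans : ∀ a b c, R a b → R b c → R a c) :
    ∀ (xs acc : List α), acc.Pairwise R → xs.Pairwise Q →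
      (∀ y ∈ acc, ∀ x ∈ xs, Q y x) →
      (List.foldl (fun acc x => PySem.List.insertBy before x acc) acc xs).Pairwise R ∧
      (List.foldl (fun acc x => PySem.List.insertBy before x acc) acc xs).Perm (acc ++ xs) := by
  intro xs
  induction xs with
  | nil => intro acc hacc _ _; exact ⟨hacc, by simp⟩
  | cons x t ih =>
    intro acc hacc hxs hcross
    have h1 : (PySem.List.insertBy before x acc).Pairwise R :=
      pv_insertBy_pairwise before R Q hA1 hA3 htrans x acc hacc
        (fun y hy => hcross y hy x (List.mem_cons_self ..))
    have h2 : (PySem.List.insertBy before x acc).Perm (x :: acc) := pv_insertBy_perm before x acc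
    have hcross' : ∀ y ∈ PySem.List.insertBy before x acc, ∀ z ∈ t, Q y z := by
      intro y hy z hz
      rcases (PySem.List.mem_insertBy before x y acc).mp hy with hy | hy
      · subst hy; exact (List.pairwise_cons.mp hxs).1 z hz
      · exact hcross y hy z (List.mem_cons_of_mem _ hz)
    obtain ⟨hp, hm⟩ := ih (PySem.List.insertBy before x acc) h1 hxs.tail hcross'
    refine ⟨hp, ?_⟩
    refine hm.trans ?_
    refine (h2.append_right t).trans ?_
    exact List.perm_middle.symm

theorem pv_sorted_pairwise_lex {α : Type} (key : α → Int) (Q : α → α → Prop)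
    (hQt : ∀ a b c, Q a b → Q b c → Q a c)
    (xs : List α) (hxs : xs.Pairwise Q) :
    (PySem.List.sorted xs key false).Pairwise (pvLexOn key Q) := by
  rw [PySem.List.sorted_eq_foldl_insertBy]
  exact (pv_sortedBy_aux _ (pvLexOn key Q) Q
    (fun a b h => Or.inl (of_decide_eq_true h))
    (fun a b h hq => by
      have := of_decide_eq_false h
      by_cases h2 : key a < key b
      · exact Or.inl h2
      · exact Or.inr ⟨by omega, hq⟩)
    (pvLexOn_trans key Q hQt) xs [] List.Pairwise.nil hxs (by simp)).1

theorem pv_sorted_char {α : Type} (key : α → Int) (Q : α → α → Prop)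
    (hQt : ∀ a b c, Q a b → Q b c → Q a c) (hQa : ∀ a b, Q a b → Q b a → False)
    (xs ys : List α) (hxs : xs.Pairwise Q) (hperm : ys.Perm xs)
    (hys : ys.Pairwise (pvLexOn key Q)) :
    PySem.List.sorted xs key false = ys := by
  rw [PySem.List.sorted_eq_foldl_insertBy]
  obtain ⟨hp, hm⟩ := pv_sortedBy_aux (fun a b => decide (key a < key b)) (pvLexOn key Q) Q
    (fun a b h => Or.inl (of_decide_eq_true h))
    (fun a b h hq => by
      have := of_decide_eq_false h
      by_cases h2 : key a < key b
      · exact Or.inl h2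
      · exact Or.inr ⟨by omega, hq⟩)
    (pvLexOn_trans key Q hQt) xs [] List.Pairwise.nil hxs (by simp)
  refine pv_pairwise_perm_eq (pvLexOn_asymm key Q hQa) _ _ ?_ hp hys
  refine List.Perm.trans ?_ hperm.symm
  simpa using hm

theorem pv_sorted2_eq_foldl {α : Type} (xs : List α) (k1 k2 : α → Int) :
    PySem.List.sorted2 xs k1 k2 false =
      List.foldl (fun acc x => PySem.List.insertBy
        (fun a b => decide (k1 a < k1 b) || !decide (k1 b < k1 a) && decide (k2 a < k2 b)) x acc)
        [] xs := rfl

theorem pv_sorted2_char {α : Type} (k1 k2 : α → Int) (xs ys : List α)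
    (hxs : xs.Pairwise (fun a b => k2 a < k2 b)) (hperm : ys.Perm xs)
    (hys : ys.Pairwise (pvLexOn k1 (fun a b => k2 a < k2 b))) :
    PySem.List.sorted2 xs k1 k2 false = ys := by
  rw [pv_sorted2_eq_foldl]
  obtain ⟨hp, hm⟩ := pv_sortedBy_aux
    (fun a b => decide (k1 a < k1 b) || !decide (k1 b < k1 a) && decide (k2 a < k2 b))
    (pvLexOn k1 (fun a b => k2 a < k2 b)) (fun a b => k2 a < k2 b)
    (fun a b h => by
      unfold pvLexOn
      by_cases h1 : k1 a < k1 b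
      · exact Or.inl h1
      · by_cases h2 : k1 b < k1 a
        · simp [h1, h2] at h
        · by_cases h3 : k2 a < k2 b
          · exact Or.inr ⟨by omega, h3⟩
          · simp [h1, h2, h3] at h)
    (fun a b h hq => by
      unfold pvLexOn
      by_cases h1 : k1 a < k1 b
      · exact Or.inl h1
      · by_cases h2 : k1 b < k1 a
        · exfalso; simp [h2] at h
        · exact Or.inr ⟨by omega, hq⟩)
    (pvLexOn_trans k1 _ (fun a b c h1 h2 => lt_trans h1 h2)) xs [] List.Pairwise.nil hxs (by simp)
  refine pv_pairwise_perm_eq (pvLexOn_asymm k1 _ (fun a b h1 h2 => absurd h1 (lt_asymm h2))) _ _ ?_ hp hys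
  refine List.Perm.trans ?_ hperm.symm
  simpa using hm

-- pairwise strengthening using membership
theorem pv_pairwise_imp_mem {α : Type} {R S : α → α → Prop} :
    ∀ {l : List α}, (∀ a b, a ∈ l → b ∈ l → R a b → S a b) → l.Pairwise R → l.Pairwise S := by
  intro l
  induction l with
  | nil => intro _ _; exact List.Pairwise.nil
  | cons x t ih =>
    intro h hp
    refine List.pairwise_cons.mpr ⟨?_, ?_⟩
    · intro z hz
      exact h x z (List.mem_cons_self ..) (List.mem_cons_of_mem _ hz)
        ((List.pairwise_cons.mp hp).1 z hz)
    · exact ih (fun a b ha hb => h a b (List.mem_cons_of_mem _ ha) (List.mem_cons_of_mem _ hb)) hp.tail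

-- enumerate as a map over range (d is an arbitrary junk default, never selected)
theorem pv_enumerate_eq {α : Type} (d : α) :
    ∀ (l : List α) (s : Int), PySem.List.enumerate l s =
      (List.range l.length).map (fun j : Nat => (s + (j : Int), l.getD j d)) := by
  intro l
  induction l with
  | nil => intro s; simp [PySem.List.enumerate]
  | cons x t ih =>
    intro s
    rw [show PySem.List.enumerate (x :: t) s = (s, x) :: PySem.List.enumerate t (s + 1) from rfl]
    rw [ih (s + 1), List.length_cons, List.range_succ_eq_map, List.map_cons, List.map_map]
    refine congrArg₂ List.cons (by simp) ?_
    apply List.map_congr_left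
    intro j _
    refine Prod.ext ?_ ?_
    · show s + 1 + (j : Int) = s + ((Nat.succ j : Nat) : Int)
      push_cast
      ring
    · show t.getD j d = (x :: t).getD (Nat.succ j) d
      rw [List.getD_cons_succ]

theorem pv_map_getD_range {α : Type} (l : List α) (d : α) :
    (List.range l.length).map (fun j => l.getD j d) = l := by
  apply List.ext_getElem
  · simp
  · intro n h1 h2
    simp only [List.getElem_map, List.getElem_range]
    exact List.getD_eq_getElem l d h2

theorem pv_foldl_enumerate {α β : Type} (f : β → α → β) :
    ∀ (l : List α) (s : Int) (init : β),
      List.foldl (fun d e => f d e.2) init (PySem.List.enumerate l s) = List.foldl f init l := by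
  intro l
  induction l with
  | nil => intro s init; simp [PySem.List.enumerate]
  | cons x t ih =>
    intro s init
    rw [show PySem.List.enumerate (x :: t) s = (s, x) :: PySem.List.enumerate t (s + 1) from rfl]
    rw [List.foldl_cons, List.foldl_cons]
    exact ih _ _

theorem pv_enumerate_pairwise_fst {α : Type} (d : α) (l : List α) (s : Int) :
    (PySem.List.enumerate l s).Pairwise (fun a b => a.1 < b.1) := by
  rw [pv_enumerate_eq d l s, List.pairwise_map]
  refine List.pairwise_lt_range.imp ?_
  intro a b h
  show s + (a : Int) < s + (b : Int)
  omega

-- A's single state pair splits into two independent dict folds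
theorem pv_aDicts_split :
    ∀ (l : List (Int × String × Int)) (d1 : PySem.Dict String Int)
      (d2 : PySem.Dict String (List (Int × Int))),
      (∀ g, d1.contains g = d2.contains g) →
      List.foldl
        (fun st e =>
          let st1 := if st.1.contains e.2.1 then st else (st.1.insert e.2.1 0, st.2.insert e.2.1 [])
          (st1.1.insert e.2.1 (st1.1.getD e.2.1 0 + e.2.2),
           st1.2.modify e.2.1 [] (fun l => l ++ [(e.2.2, e.1)])))
        (d1, d2) l
      = (List.foldl (fun d e => d.insert e.2.1 (d.getD e.2.1 0 + e.2.2)) d1 l,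
         List.foldl (fun d e => d.modify e.2.1 [] (fun l => l ++ [(e.2.2, e.1)])) d2 l) := by
  intro l
  induction l with
  | nil => intro d1 d2 _; rfl
  | cons e t ih =>
    intro d1 d2 hinv
    simp only [List.foldl_cons]
    have hstep :
        (let st1 := if (d1, d2).1.contains e.2.1 then (d1, d2)
            else ((d1, d2).1.insert e.2.1 0, (d1, d2).2.insert e.2.1 [])
         (st1.1.insert e.2.1 (st1.1.getD e.2.1 0 + e.2.2),
          st1.2.modify e.2.1 [] (fun l => l ++ [(e.2.2, e.1)])))
        = (d1.insert e.2.1 (d1.getD e.2.1 0 + e.2.2),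
           d2.modify e.2.1 [] (fun l => l ++ [(e.2.2, e.1)])) := by
      by_cases hc : d1.contains e.2.1
      · simp [hc]
      · have hc2 : d2.contains e.2.1 = false := by rw [← hinv]; simpa using hc
        simp only [hc, Bool.false_eq_true, if_false, PySem.Dict.modify]
        refine Prod.ext ?_ ?_
        · show (d1.insert e.2.1 0).insert e.2.1 ((d1.insert e.2.1 0).getD e.2.1 0 + e.2.2)
            = d1.insert e.2.1 (d1.getD e.2.1 0 + e.2.2)
          rw [PySem.Dict.getD_insert_self, PySem.Dict.insert_insert_self,
            PySem.Dict.getD_of_not_contains d1 _ (by simpa using hc)]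
        · show (d2.insert e.2.1 []).insert e.2.1 ((d2.insert e.2.1 []).getD e.2.1 [] ++ [(e.2.2, e.1)])
            = d2.insert e.2.1 (d2.getD e.2.1 [] ++ [(e.2.2, e.1)])
          rw [PySem.Dict.getD_insert_self, PySem.Dict.insert_insert_self,
            PySem.Dict.getD_of_not_contains d2 _ hc2]
    rw [hstep]
    exact ih _ _ (by
      intro g
      rw [PySem.Dict.modify, PySem.Dict.contains_insert, PySem.Dict.contains_insert, hinv g])

theorem pv_flatMap_congr {α β : Type} {f f' : α → List β} :
    ∀ {K : List α}, (∀ a ∈ K, f a = f' a) → K.flatMap f = K.flatMap f' := by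
  intro K
  induction K with
  | nil => intro _; rfl
  | cons a t ih =>
    intro h
    rw [List.flatMap_cons, List.flatMap_cons, h a (List.mem_cons_self ..),
      ih (fun a ha => h a (List.mem_cons_of_mem _ ha))]

-- partitioning a list by the distinct key values it maps into is a permutation
theorem pv_partition_perm {α κ : Type} [BEq κ] [LawfulBEq κ] (kf : α → κ) :
    ∀ (K : List κ) (l : List α), K.Nodup → (∀ x ∈ l, kf x ∈ K) →
      (K.flatMap (fun g => l.filter (fun x => kf x == g))).Perm l := by
  intro K
  induction K with
  | nil =>
    intro l _ hcov
    have : l = [] := List.eq_nil_iff_forall_not_mem.mpr (fun x hx => by simpa using hcov x hx)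
    simp [this]
  | cons g K' ih =>
    intro l hnd hcov
    rw [List.flatMap_cons]
    have hg_notmem : g ∉ K' := (List.nodup_cons.mp hnd).1
    have hsub : K'.flatMap (fun g' => l.filter (fun x => kf x == g'))
        = K'.flatMap (fun g' => (l.filter (fun x => !(kf x == g))).filter (fun x => kf x == g')) := by
      apply pv_flatMap_congr
      intro g' hg'
      rw [List.filter_filter]
      apply List.filter_congr
      intro x _
      cases hv : kf x == g'
      · simp
      · have hxg' : kf x = g' := by simpa using hv
        have hne : (kf x == g) = false := by
          simp only [beq_eq_false_iff_ne, ne_eq, hxg']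
          intro he
          exact hg_notmem (he ▸ hg')
        simp [hne]
    rw [hsub]
    have hcov' : ∀ x ∈ l.filter (fun x => !(kf x == g)), kf x ∈ K' := by
      intro x hx
      obtain ⟨hxl, hxp⟩ := List.mem_filter.mp hx
      have hne : kf x ≠ g := by simpa using hxp
      rcases List.mem_cons.mp (hcov x hxl) with h | h
      · exact absurd h hne
      · exact h
    have hperm' := ih (l.filter (fun x => !(kf x == g))) (List.nodup_cons.mp hnd).2 hcov'
    exact (hperm'.append_left _).trans (List.filter_append_perm _ l)

-- the counting pass over one uniform-genre block
theorem pv_countGroup (genres : List String) (g : String) :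
    ∀ (l : List Int) (ans : List Int) (d : PySem.Dict String Int),
      (∀ i ∈ l, PySem.List.pyGetD genres i "" = g) → 0 ≤ d.getD g 0 →
      (List.foldl
          (fun (st : List Int × PySem.Dict String Int) i =>
            if st.2.getD (PySem.List.pyGetD genres i "") 0 < 2 then
              (st.1 ++ [i],
               st.2.insert (PySem.List.pyGetD genres i "")
                 (st.2.getD (PySem.List.pyGetD genres i "") 0 + 1))
            else st)
          (ans, d) l).1
        = ans ++ l.take (2 - (d.getD g 0).toNat) ∧
      ∀ g', g' ≠ g →
        (List.foldl
          (fun (st : List Int × PySem.Dict String Int) i =>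
            if st.2.getD (PySem.List.pyGetD genres i "") 0 < 2 then
              (st.1 ++ [i],
               st.2.insert (PySem.List.pyGetD genres i "")
                 (st.2.getD (PySem.List.pyGetD genres i "") 0 + 1))
            else st)
          (ans, d) l).2.getD g' 0 = d.getD g' 0 := by
  intro l
  induction l with
  | nil => intro ans d _ _; simp
  | cons i t ih =>
    intro ans d hall hnn
    have hg : PySem.List.pyGetD genres i "" = g := hall i (List.mem_cons_self ..)
    simp only [List.foldl_cons, hg]
    by_cases hlt : d.getD g 0 < 2
    · simp only [if_pos hlt]
      obtain ⟨h1, h2⟩ := ih (ans ++ [i]) (d.insert g (d.getD g 0 + 1))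
        (fun j hj => hall j (List.mem_cons_of_mem _ hj))
        (by rw [PySem.Dict.getD_insert_self]; omega)
      constructor
      · rw [h1, PySem.Dict.getD_insert_self]
        have harith : 2 - (d.getD g 0).toNat = (2 - (d.getD g 0 + 1).toNat) + 1 := by omega
        rw [harith, List.take_succ_cons]
        simp
      · intro g' hne
        rw [h2 g' hne, PySem.Dict.getD_insert_of_ne _ _ _ hne]
    · simp only [if_neg hlt]
      obtain ⟨h1, h2⟩ := ih ans d (fun j hj => hall j (List.mem_cons_of_mem _ hj)) hnn
      constructor
      · rw [h1]
        have h0 : 2 - (d.getD g 0).toNat = 0 := by omega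
        rw [h0]
        simp
      · exact h2

-- the counting pass over a concatenation of genre blocks keeps the first two per block
theorem pv_countFlat (genres : List String) :
    ∀ (G : List String) (F : String → List Int) (ans : List Int) (d : PySem.Dict String Int),
      G.Nodup → (∀ g ∈ G, ∀ i ∈ F g, PySem.List.pyGetD genres i "" = g) →
      (∀ g ∈ G, d.getD g 0 = 0) →
      (List.foldl
          (fun (st : List Int × PySem.Dict String Int) i =>
            if st.2.getD (PySem.List.pyGetD genres i "") 0 < 2 then
              (st.1 ++ [i],
               st.2.insert (PySem.List.pyGetD genres i "")
                 (st.2.getD (PySem.List.pyGetD genres i "") 0 + 1))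
            else st)
          (ans, d) (G.flatMap F)).1
        = ans ++ G.flatMap (fun g => (F g).take 2) := by
  intro G
  induction G with
  | nil => intro F ans d _ _ _; simp
  | cons g G' ih =>
    intro F ans d hnd hall h0
    rw [List.flatMap_cons, List.foldl_append]
    obtain ⟨h1, h2⟩ := pv_countGroup genres g (F g) ans d
      (fun i hi => hall g (List.mem_cons_self ..) i hi)
      (by rw [h0 g (List.mem_cons_self ..)])
    set r := List.foldl
        (fun (st : List Int × PySem.Dict String Int) i =>
          if st.2.getD (PySem.List.pyGetD genres i "") 0 < 2 then
            (st.1 ++ [i],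
             st.2.insert (PySem.List.pyGetD genres i "")
               (st.2.getD (PySem.List.pyGetD genres i "") 0 + 1))
          else st)
        (ans, d) (F g) with hr
    have hre : r = (r.1, r.2) := rfl
    rw [hre]
    rw [ih F r.1 r.2 (List.nodup_cons.mp hnd).2
      (fun g' hg' i hi => hall g' (List.mem_cons_of_mem _ hg') i hi)
      (by
        intro g' hg'
        have hne : g' ≠ g := fun he => (List.nodup_cons.mp hnd).1 (he ▸ hg')
        rw [h2 g' hne]
        exact h0 g' (List.mem_cons_of_mem _ hg'))]
    rw [h1, h0 g (List.mem_cons_self ..), List.flatMap_cons]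
    simp [List.append_assoc]

-- ===== canonical intermediate objects shared by both directions =====
def pvT (genres : List String) (plays : List Int) : PySem.Dict String Int :=
  List.foldl (fun d gp => d.insert gp.1 (d.getD gp.1 0 + gp.2)) PySem.Dict.empty
    (genres.zip plays)

def pvG (genres : List String) (plays : List Int) : List String :=
  PySem.List.sorted (pvT genres plays).keys (fun g => (pvT genres plays).getD g 0) true

def pvS1 (genres : List String) (plays : List Int) : List Int :=
  PySem.List.sorted (PySem.List.pyRange 0 (min (genres.length : Int) (plays.length : Int)) 1)
    (fun i => -(PySem.List.pyGetD plays i 0)) false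

def pvFilt (genres : List String) (plays : List Int) (g : String) : List Int :=
  (pvS1 genres plays).filter (fun i => PySem.List.pyGetD genres i "" == g)

def pvAns (genres : List String) (plays : List Int) : List Int :=
  (pvG genres plays).flatMap (fun g => (pvFilt genres plays g).take 2)

-- basic facts about the shared objects
theorem pv_range_eq (genres : List String) (plays : List Int) :
    PySem.List.pyRange 0 (min (genres.length : Int) (plays.length : Int)) 1 =
      List.map (fun k : Nat => (k : Int)) (List.range (min genres.length plays.length)) := by
  rw [show (min (genres.length : Int) (plays.length : Int))
      = ((min genres.length plays.length : Nat) : Int) from by push_cast; rfl]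
  exact PySem.List.pyRange_zero_natCast _

theorem pv_range_pairwise (genres : List String) (plays : List Int) :
    (PySem.List.pyRange 0 (min (genres.length : Int) (plays.length : Int)) 1).Pairwise
      (fun a b : Int => a < b) := by
  rw [pv_range_eq, List.pairwise_map]
  refine List.pairwise_lt_range.imp ?_
  intro a b h
  exact_mod_cast h

theorem pv_S1_pairwise (genres : List String) (plays : List Int) :
    (pvS1 genres plays).Pairwise
      (pvLexOn (fun i => -(PySem.List.pyGetD plays i 0)) (fun a b : Int => a < b)) := by
  unfold pvS1
  exact pv_sorted_pairwise_lex (fun i => -(PySem.List.pyGetD plays i 0)) (fun a b : Int => a < b)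
    (fun a b c h1 h2 => lt_trans h1 h2) _ (pv_range_pairwise genres plays)

theorem pv_S1_perm (genres : List String) (plays : List Int) :
    (pvS1 genres plays).Perm
      (PySem.List.pyRange 0 (min (genres.length : Int) (plays.length : Int)) 1) :=
  PySem.List.sorted_perm _ _ _

theorem pv_T_keys (genres : List String) (plays : List Int) :
    (pvT genres plays).keys = PySem.Set.ofList ((genres.zip plays).map (fun gp => gp.1)) := by
  unfold pvT
  rw [PySem.Dict.keys_foldl_insert_key (genres.zip plays) (fun gp => gp.1)
    (fun d gp => d.getD gp.1 0 + gp.2) PySem.Dict.empty]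
  rw [PySem.Dict.keys_empty, PySem.Set.ofList_eq_foldl]
  rfl

theorem pv_T_keys_nodup (genres : List String) (plays : List Int) :
    (pvT genres plays).keys.Nodup := by
  unfold pvT
  exact PySem.Dict.nodup_keys_foldl_insert_key (genres.zip plays) (fun gp => gp.1)
    (fun d gp => d.getD gp.1 0 + gp.2) PySem.Dict.empty
    (by rw [PySem.Dict.keys_empty]; exact List.nodup_nil)

theorem pv_G_nodup (genres : List String) (plays : List Int) : (pvG genres plays).Nodup :=
  (PySem.List.sorted_perm _ _ _).symm.nodup (pv_T_keys_nodup genres plays)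

theorem pv_getD_in_range (genres : List String) (plays : List Int) (j : Nat)
    (hj : j < min genres.length plays.length) :
    PySem.List.pyGetD genres (j : Int) "" =
      genres[j]'(lt_of_lt_of_le hj (min_le_left _ _)) := by
  rw [PySem.List.pyGetD_natCast]
  exact List.getD_eq_getElem genres "" (lt_of_lt_of_le hj (min_le_left _ _))

theorem pv_pgetD_in_range (genres : List String) (plays : List Int) (j : Nat)
    (hj : j < min genres.length plays.length) :
    PySem.List.pyGetD plays (j : Int) 0 =
      plays[j]'(lt_of_lt_of_le hj (min_le_right _ _)) := by
  rw [PySem.List.pyGetD_natCast]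
  exact List.getD_eq_getElem plays 0 (lt_of_lt_of_le hj (min_le_right _ _))

theorem pv_cover (genres : List String) (plays : List Int) :
    ∀ i ∈ pvS1 genres plays, PySem.List.pyGetD genres i "" ∈ pvG genres plays := by
  intro i hi
  have hi' : i ∈ PySem.List.pyRange 0 (min (genres.length : Int) (plays.length : Int)) 1 :=
    (PySem.List.mem_sorted _ _ _ _).mp hi
  rw [pv_range_eq] at hi'
  obtain ⟨j, hj, rfl⟩ := List.mem_map.mp hi'
  have hjlt : j < min genres.length plays.length := List.mem_range.mp hj
  rw [pv_getD_in_range genres plays j hjlt]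
  unfold pvG
  apply (PySem.List.mem_sorted _ _ _ _).mpr
  rw [pv_T_keys, PySem.Set.mem_ofList]
  apply List.mem_map.mpr
  refine ⟨(genres.zip plays)[j]'(by rw [List.length_zip]; exact hjlt), List.getElem_mem _, ?_⟩
  simp [List.getElem_zip]

-- the rank dict maps the j-th genre of G to j
theorem pv_rank_getD (G : List String) (hG : G.Nodup) (j : Nat) (hj : j < G.length) :
    (List.foldl (fun d rg => d.insert rg.2 rg.1) PySem.Dict.empty
        (PySem.List.enumerate G 0)).getD (G[j]) 0 = (j : Int) := by
  have hmap_snd : (PySem.List.enumerate G 0).map (fun a => a.2) = G := by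
    rw [pv_enumerate_eq "" G 0, List.map_map]
    exact pv_map_getD_range G ""
  have hitems : (List.foldl (fun d rg => d.insert rg.2 rg.1) PySem.Dict.empty
        (PySem.List.enumerate G 0)).items
      = (PySem.Dict.empty : PySem.Dict String Int).items
          ++ (PySem.List.enumerate G 0).map (fun a => (a.2, a.1)) :=
    PySem.Dict.items_foldl_insert_fresh (PySem.List.enumerate G 0)
      (fun a => a.2) (fun a => a.1) PySem.Dict.empty
      (fun a _ => PySem.Dict.contains_empty _) (by rw [hmap_snd]; exact hG)
  have hempty_items : (PySem.Dict.empty : PySem.Dict String Int).items = [] := rfl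
  have hkeys : (List.foldl (fun d rg => d.insert rg.2 rg.1) PySem.Dict.empty
        (PySem.List.enumerate G 0)).keys = G := by
    show ((List.foldl (fun d rg => d.insert rg.2 rg.1) PySem.Dict.empty
        (PySem.List.enumerate G 0)).items).map (fun p => p.1) = G
    rw [hitems, hempty_items, List.nil_append, List.map_map]
    exact hmap_snd
  have hkeys_nodup : (List.foldl (fun d rg => d.insert rg.2 rg.1) PySem.Dict.empty
        (PySem.List.enumerate G 0)).keys.Nodup := by rw [hkeys]; exact hG
  have hmem : (G[j], (j : Int)) ∈ (List.foldl (fun d rg => d.insert rg.2 rg.1) PySem.Dict.empty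
        (PySem.List.enumerate G 0)).items := by
    rw [hitems, hempty_items, List.nil_append, pv_enumerate_eq "" G 0, List.map_map]
    apply List.mem_map.mpr
    refine ⟨j, List.mem_range.mpr hj, ?_⟩
    have hgd : G.getD j "" = G[j] := List.getD_eq_getElem G "" hj
    show (G.getD j "", 0 + (j : Int)) = (G[j], (j : Int))
    rw [hgd]
    norm_num
  have hget := PySem.Dict.get?_of_mem_items _ hmem hkeys_nodup
  rw [PySem.Dict.getD_eq_get?_getD, hget]
  rfl

-- G ordered strictly by rank
theorem pv_G_rank_pairwise (genres : List String) (plays : List Int) :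
    (pvG genres plays).Pairwise (fun g g' =>
      (List.foldl (fun d rg => d.insert rg.2 rg.1) PySem.Dict.empty
          (PySem.List.enumerate (pvG genres plays) 0)).getD g 0 <
      (List.foldl (fun d rg => d.insert rg.2 rg.1) PySem.Dict.empty
          (PySem.List.enumerate (pvG genres plays) 0)).getD g' 0) := by
  rw [List.pairwise_iff_getElem]
  intro a b ha hb hab
  rw [pv_rank_getD _ (pv_G_nodup genres plays) a ha,
    pv_rank_getD _ (pv_G_nodup genres plays) b hb]
  exact_mod_cast hab

-- ===== the per-genre block equality used on A's side =====
theorem pv_filt_map_eq (genres : List String) (plays : List Int) (g : String) :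
    ((PySem.List.pyRange 0 (min (genres.length : Int) (plays.length : Int)) 1).filter
        (fun i => PySem.List.pyGetD genres i "" == g)).map
      (fun i => (PySem.List.pyGetD plays i 0, i))
    = ((PySem.List.enumerate (genres.zip plays) 0).filter
        (fun (e : Int × String × Int) => e.2.1 == g)).map
        (fun (e : Int × String × Int) => (e.2.2, e.1)) := by
  rw [pv_range_eq, pv_enumerate_eq ("", 0) (genres.zip plays) 0, List.filter_map,
    List.filter_map, List.map_map, List.map_map, List.length_zip]
  have hfc : ∀ j ∈ List.range (min genres.length plays.length),
      ((fun i => PySem.List.pyGetD genres i "" == g) ∘ (fun k : Nat => (k : Int))) j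
      = ((fun (e : Int × String × Int) => e.2.1 == g) ∘
          (fun j : Nat => ((0 : Int) + (j : Int), (genres.zip plays).getD j ("", 0)))) j := by
    intro j hj
    have hjlt : j < min genres.length plays.length := List.mem_range.mp hj
    have hzlen : j < (genres.zip plays).length := by rw [List.length_zip]; exact hjlt
    simp only [Function.comp, pv_getD_in_range genres plays j hjlt,
      List.getD_eq_getElem (genres.zip plays) ("", 0) hzlen, List.getElem_zip]
  rw [List.filter_congr hfc]
  apply List.map_congr_left
  intro j hj
  have hjlt : j < min genres.length plays.length :=
    List.mem_range.mp (List.mem_of_mem_filter hj)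
  have hzlen : j < (genres.zip plays).length := by rw [List.length_zip]; exact hjlt
  simp only [Function.comp, pv_pgetD_in_range genres plays j hjlt,
    List.getD_eq_getElem (genres.zip plays) ("", 0) hzlen, List.getElem_zip, zero_add]

-- A's per-genre block: sort-and-slice of the song dict equals take-2 of the canonical block
theorem pv_perGenre (genres : List String) (plays : List Int) (g : String) :
    (PySem.List.slice
        (PySem.List.sorted2
          ((List.foldl (fun d e => d.modify e.2.1 [] (fun l => l ++ [(e.2.2, e.1)]))
              PySem.Dict.empty (PySem.List.enumerate (genres.zip plays) 0)).getD g [])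
          (fun x => -x.1) (fun x => x.2) false)
        none (some 2)).map (fun x => x.2)
    = (pvFilt genres plays g).take 2 := by
  have hgetD : (List.foldl (fun d e => d.modify e.2.1 [] (fun l => l ++ [(e.2.2, e.1)]))
        PySem.Dict.empty (PySem.List.enumerate (genres.zip plays) 0)).getD g []
      = ((PySem.List.enumerate (genres.zip plays) 0).filter
            (fun (e : Int × String × Int) => e.2.1 == g)).map
          (fun (e : Int × String × Int) => (e.2.2, e.1)) := by
    have hmapfold : List.foldl (fun d e => d.modify e.2.1 [] (fun l => l ++ [(e.2.2, e.1)]))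
          (PySem.Dict.empty : PySem.Dict String (List (Int × Int)))
          (PySem.List.enumerate (genres.zip plays) 0)
        = List.foldl (fun d p => d.modify p.1 [] (fun l => l ++ [p.2]))
            PySem.Dict.empty
            ((PySem.List.enumerate (genres.zip plays) 0).map
              (fun (e : Int × String × Int) => (e.2.1, (e.2.2, e.1)))) := by
      rw [List.foldl_map]
    rw [hmapfold, PySem.Dict.getD_foldl_modify_append, PySem.Dict.getD_empty, List.nil_append,
      List.filter_map, List.map_map]
    rfl
  rw [hgetD]
  have hmain : PySem.List.sorted2
      (((PySem.List.enumerate (genres.zip plays) 0).filter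
          (fun (e : Int × String × Int) => e.2.1 == g)).map
        (fun (e : Int × String × Int) => (e.2.2, e.1)))
      (fun x => -x.1) (fun x => x.2) false
      = (pvFilt genres plays g).map (fun i => (PySem.List.pyGetD plays i 0, i)) := by
    apply pv_sorted2_char
    · -- the appended song list is strictly increasing in the index component
      rw [List.pairwise_map]
      exact List.Pairwise.sublist List.filter_sublist
        (pv_enumerate_pairwise_fst ("", 0) (genres.zip plays) 0)
    · -- permutation: the canonical block is a rearrangement of the song list
      unfold pvFilt
      have h1 := (pv_S1_perm genres plays).filter
        (fun i => PySem.List.pyGetD genres i "" == g)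
      have h2 := h1.map (fun i => (PySem.List.pyGetD plays i 0, i))
      rw [pv_filt_map_eq genres plays g] at h2
      exact h2
    · -- ordered: play descending then index ascending along the canonical block
      unfold pvFilt
      rw [List.pairwise_map]
      exact List.Pairwise.sublist List.filter_sublist (pv_S1_pairwise genres plays)
  rw [hmain, PySem.List.slice_to _ (by norm_num)]
  rw [show ((2 : Int)).toNat = 2 from rfl, ← List.map_take, List.map_map]
  have hid : ((fun x : Int × Int => x.2) ∘ (fun i : Int => (PySem.List.pyGetD plays i 0, i))) = id :=
    rfl
  rw [hid, List.map_id]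

-- bridges from the raw port terms to the canonical objects
theorem pv_cnt_eq (genres : List String) (plays : List Int) :
    List.foldl (fun d (e : Int × String × Int) => d.insert e.2.1 (d.getD e.2.1 0 + e.2.2))
        PySem.Dict.empty (PySem.List.enumerate (genres.zip plays) 0)
      = pvT genres plays := by
  unfold pvT
  exact pv_foldl_enumerate (fun (d : PySem.Dict String Int) (gp : String × Int) => d.insert gp.1 (d.getD gp.1 0 + gp.2)) (genres.zip plays) 0 _

-- ===== A equals the canonical answer =====
theorem pv_A_eq (genres : List String) (plays : List Int) :
    solution genres plays = pvAns genres plays := by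
  simp only [solution]
  rw [pv_aDicts_split (PySem.List.enumerate (genres.zip plays) 0) PySem.Dict.empty
    PySem.Dict.empty (fun gq => by rw [PySem.Dict.contains_empty, PySem.Dict.contains_empty])]
  rw [PySem.List.foldl_append_eq_flatMap, List.nil_append]
  rw [pv_cnt_eq]
  unfold pvAns pvG
  apply pv_flatMap_congr
  intro g _
  exact pv_perGenre genres plays g

-- ===== B equals the canonical answer =====
theorem pv_B_eq (genres : List String) (plays : List Int) :
    solution_alt genres plays = pvAns genres plays := by
  simp only [solution_alt]
  rw [show List.foldl (fun d (gp : String × Int) => d.insert gp.1 (d.getD gp.1 0 + gp.2))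
      PySem.Dict.empty (genres.zip plays) = pvT genres plays from rfl]
  rw [show PySem.List.sorted (pvT genres plays).keys (fun g => (pvT genres plays).getD g 0) true
      = pvG genres plays from rfl]
  rw [show PySem.List.sorted
      (PySem.List.pyRange 0 (min (genres.length : Int) (plays.length : Int)) 1)
      (fun i => -(PySem.List.pyGetD plays i 0)) false = pvS1 genres plays from rfl]
  have horder2 : PySem.List.sorted (pvS1 genres plays)
      (fun i => (List.foldl (fun d rg => d.insert rg.2 rg.1) PySem.Dict.empty
          (PySem.List.enumerate (pvG genres plays) 0)).getD (PySem.List.pyGetD genres i "") 0)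
      false
      = (pvG genres plays).flatMap (fun g => pvFilt genres plays g) := by
    apply pv_sorted_char _
      (pvLexOn (fun i => -(PySem.List.pyGetD plays i 0)) (fun a b : Int => a < b))
    · exact pvLexOn_trans _ _ (fun a b c h1 h2 => lt_trans h1 h2)
    · exact pvLexOn_asymm _ _ (fun a b h1 h2 => absurd h1 (lt_asymm h2))
    · exact pv_S1_pairwise genres plays
    · exact pv_partition_perm (fun i => PySem.List.pyGetD genres i "") (pvG genres plays)
        (pvS1 genres plays) (pv_G_nodup genres plays) (pv_cover genres plays)
    · -- ordered: rank strictly increases across blocks, ties ordered as in pvS1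
      apply List.pairwise_flatMap.mpr
      constructor
      · intro g _
        unfold pvFilt
        apply pv_pairwise_imp_mem
          (R := pvLexOn (fun i => -(PySem.List.pyGetD plays i 0)) (fun a b : Int => a < b))
        · intro a b ha hb hr
          have hga : PySem.List.pyGetD genres a "" = g := by
            simpa using (List.mem_filter.mp ha).2
          have hgb : PySem.List.pyGetD genres b "" = g := by
            simpa using (List.mem_filter.mp hb).2
          refine Or.inr ⟨?_, hr⟩
          simp only [hga, hgb]
        · exact List.Pairwise.sublist List.filter_sublist (pv_S1_pairwise genres plays)
      · refine (pv_G_rank_pairwise genres plays).imp ?_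
        intro g g' hlt a ha b hb
        have hga : PySem.List.pyGetD genres a "" = g := by
          simpa [pvFilt] using (List.mem_filter.mp ha).2
        have hgb : PySem.List.pyGetD genres b "" = g' := by
          simpa [pvFilt] using (List.mem_filter.mp hb).2
        refine Or.inl ?_
        simp only [hga, hgb]
        exact hlt
  rw [horder2]
  rw [pv_countFlat genres (pvG genres plays) (fun g => pvFilt genres plays g) [] PySem.Dict.empty
    (pv_G_nodup genres plays)
    (fun g _ i hi => by simpa [pvFilt] using (List.mem_filter.mp hi).2)
    (fun g _ => PySem.Dict.getD_empty g 0)]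
  rw [List.nil_append]
  rfl

-- ===== VERDICT (by name: the statement is the Claim_ definition above) =====
theorem solution_spec : Claim_equal_solution := by
  intro genres plays _
  unfold Spec_solution
  rw [pv_A_eq, pv_B_eq]
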